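-- pv_equiv track=rewrite | github.com/polito-ao/argentum-united-client | tools/parse_cucsi_graphics.py | verify_server_items_coverage
-- ===== SOURCE A (Python) =====
-- from typing import Dict, List, Optional, Tuple
--
-- def verify_server_items_coverage(
--     items_catalog: Dict[str, Dict],
--     server_grh_ids: List[int],
-- ) -> List[str]:
--     """
--     Returns a list of human-readable error strings, one per icon_grh_id that
--     the server references but the client catalog does not contain. Empty
--     list = full coverage.
--     """
--     present = {entry["id"] for entry in items_catalog.values()}
--     errors: List[str] = []
--     for grh_id in sorted(set(server_grh_ids)):
--         if grh_id not in present: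
--             errors.append(
--                 f"server items.yml references icon_grh_id={grh_id} but "
--                 f"item_icon_{grh_id} is NOT in the emitted client catalog"
--             )
--     return errors
-- ===== SOURCE B (Python) =====
-- from typing import Dict, List
--
--
-- def verify_server_items_coverage(
--     items_catalog: Dict[str, Dict],
--     server_grh_ids: List[int],
-- ) -> List[str]:
--     # Merge-style scan: walk the sorted catalog ids and the sorted server ids
--     # in lockstep with a single cursor, instead of per-id set membership tests.
--     present_sorted = sorted({entry["id"] for entry in items_catalog.values()})
--     errors: List[str] = []
--     i = 0
--     n = len(present_sorted)
--     for grh_id in sorted(set(server_grh_ids)):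
--         while i < n and present_sorted[i] < grh_id:
--             i += 1
--         if i == n or present_sorted[i] != grh_id:
--             errors.append(
--                 f"server items.yml references icon_grh_id={grh_id} but "
--                 f"item_icon_{grh_id} is NOT in the emitted client catalog"
--             )
--     return errors
-- ===== Notes on version B (the rewrite author's own statement) =====
-- stated objective: alternative
-- what changed: B sorts the catalog ids too and finds the missing server ids by a merge-style two-pointer scan of the two sorted lists with one monotone cursor, instead of A's per-id membership test against a hash set.
import Mathlib
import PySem

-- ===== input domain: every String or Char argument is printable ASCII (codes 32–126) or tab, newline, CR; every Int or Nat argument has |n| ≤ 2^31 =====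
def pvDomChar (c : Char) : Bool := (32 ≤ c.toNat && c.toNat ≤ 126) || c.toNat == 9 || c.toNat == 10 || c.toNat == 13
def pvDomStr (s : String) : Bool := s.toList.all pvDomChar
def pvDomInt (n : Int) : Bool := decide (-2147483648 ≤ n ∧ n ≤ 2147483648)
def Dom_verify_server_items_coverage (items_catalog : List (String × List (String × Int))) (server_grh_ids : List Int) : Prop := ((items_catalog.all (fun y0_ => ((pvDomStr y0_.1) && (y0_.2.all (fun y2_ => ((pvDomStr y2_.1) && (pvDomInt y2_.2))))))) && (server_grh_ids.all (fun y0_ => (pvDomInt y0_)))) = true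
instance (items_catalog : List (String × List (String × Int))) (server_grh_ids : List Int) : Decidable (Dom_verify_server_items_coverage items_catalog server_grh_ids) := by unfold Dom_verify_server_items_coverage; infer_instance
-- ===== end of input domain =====

-- ===== PORT A =====
-- B replaces A's per-id membership test in a set by a merge-style lockstep scan of the
-- two sorted id lists with one cursor (alternative algorithm, same output).
-- A raises KeyError when a catalog value lacks the key "id"; Pre_ excludes exactly that.
-- Shared f-string of both Pythons:
def pvMsg (g : Int) : String :=
  "server items.yml references icon_grh_id=" ++ PySem.Int.toStr g ++
  " but item_icon_" ++ PySem.Int.toStr g ++ " is NOT in the emitted client catalog"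

def verify_server_items_coverage (items_catalog : List (String × List (String × Int))) (server_grh_ids : List Int) : List String :=
  match items_catalog.mapM (fun e => (PySem.Dict.mk e.2).get? "id") with
  | none => []  -- Python raises KeyError here; outside Pre_
  | some vals =>
    let present : PySem.Set Int := PySem.Set.ofList vals
    (PySem.List.sorted (PySem.Set.ofList server_grh_ids) (fun x => x)).foldl
      (fun errors grh_id =>
        if !(PySem.Set.contains present grh_id) then errors ++ [pvMsg grh_id] else errors) []

-- ===== PORT B =====
-- the 'while i < n and present_sorted[i] < grh_id: i += 1' loop of Source B
def pvAdvance (p : List Int) (i : Nat) (g : Int) : Nat :=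
  if h : i < p.length then
    if p[i] < g then pvAdvance p (i + 1) g else i
  else i
termination_by p.length - i

def verify_server_items_coverage_alt (items_catalog : List (String × List (String × Int))) (server_grh_ids : List Int) : List String :=
  match items_catalog.mapM (fun e => (PySem.Dict.mk e.2).get? "id") with
  | none => []  -- Python raises KeyError here; outside Pre_
  | some vals =>
    let presentSorted : List Int := PySem.List.sorted (PySem.Set.ofList vals) (fun x => x)
    let n := presentSorted.length
    ((PySem.List.sorted (PySem.Set.ofList server_grh_ids) (fun x => x)).foldl
      (fun (st : Nat × List String) grh_id =>
        let i := pvAdvance presentSorted st.1 grh_id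
        if i = n ∨ presentSorted[i]? ≠ some grh_id
        then (i, st.2 ++ [pvMsg grh_id]) else (i, st.2)) (0, [])).2

-- ===== PRECONDITION & SPEC =====
-- Pre_ excludes exactly the inputs where A raises KeyError: a catalog value without an "id" key.
def Pre_verify_server_items_coverage (items_catalog : List (String × List (String × Int))) (server_grh_ids : List Int) : Prop :=
  ∀ e ∈ items_catalog, "id" ∈ e.2.map Prod.fst
instance (items_catalog : List (String × List (String × Int))) (server_grh_ids : List Int) : Decidable (Pre_verify_server_items_coverage items_catalog server_grh_ids) := by unfold Pre_verify_server_items_coverage; infer_instance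
def pvWitness_verify_server_items_coverage : (List (String × List (String × Int))) × List Int :=
  ([("apple", [("id", 3)]), ("sword", [("id", 5)])], [7, 3, 1])

def Spec_verify_server_items_coverage (items_catalog : List (String × List (String × Int))) (server_grh_ids : List Int) (out : List String) : Prop := out = verify_server_items_coverage_alt items_catalog server_grh_ids
instance (items_catalog : List (String × List (String × Int))) (server_grh_ids : List Int) (out : List String) : Decidable (Spec_verify_server_items_coverage items_catalog server_grh_ids out) := by unfold Spec_verify_server_items_coverage; infer_instance

-- ===== CLAIM (what is proved, stated in full; the proofs are below) =====
def Claim_equal_verify_server_items_coverage : Prop := ∀ (items_catalog : List (String × List (String × Int))) (server_grh_ids : List Int), Dom_verify_server_items_coverage items_catalog server_grh_ids → Pre_verify_server_items_coverage items_catalog server_grh_ids → Spec_verify_server_items_coverage items_catalog server_grh_ids (verify_server_items_coverage items_catalog server_grh_ids)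

-- ===== LEMMAS AND PROOFS =====

-- Under Pre_, every catalog value has an "id" key, so A's lookups all succeed
lemma mapM_isSome_of_pre (l : List (String × List (String × Int)))
    (h : ∀ e ∈ l, "id" ∈ e.2.map Prod.fst) :
    (l.mapM (fun e => (PySem.Dict.mk e.2).get? "id")).isSome := by
  induction l with
  | nil => simp
  | cons x xs ih =>
    have hx : ((PySem.Dict.mk x.2).get? "id").isSome := by
      rcases Option.eq_none_or_eq_some ((PySem.Dict.mk x.2).get? "id") with hn | ⟨v, hv⟩
      · exact absurd ((PySem.Dict.get?_eq_none_iff_not_mem_keys _ _).1 hn)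
          (by simpa [PySem.Dict.keys] using h x (List.mem_cons_self))
      · simp [hv]
    rcases Option.isSome_iff_exists.1 hx with ⟨v, hv⟩
    rcases Option.isSome_iff_exists.1 (ih (fun e he => h e (List.mem_cons_of_mem _ he))) with ⟨vs, hvs⟩
    simp [List.mapM_cons, hv, hvs]

-- the while loop stops at the first index ≥ i whose element is not < g,
-- provided everything before i is already < g
lemma pvAdvance_spec_aux (p : List Int) (g : Int) :
    ∀ (k i : Nat), p.length - i ≤ k → i ≤ p.length →
      (∀ j (h1 : j < i) (h2 : j < p.length), p[j] < g) →
      pvAdvance p i g ≤ p.length ∧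
      (∀ j (h1 : j < pvAdvance p i g) (h2 : j < p.length), p[j] < g) ∧
      (∀ h : pvAdvance p i g < p.length, ¬ p[pvAdvance p i g] < g) := by
  intro k
  induction k with
  | zero =>
    intro i hk hle hbelow
    have h : ¬ i < p.length := by omega
    rw [pvAdvance, dif_neg h]
    exact ⟨hle, hbelow, fun hc => absurd hc h⟩
  | succ k ih =>
    intro i hk hle hbelow
    by_cases h : i < p.length
    · by_cases hlt : p[i] < g
      · rw [pvAdvance, dif_pos h, if_pos hlt]
        refine ih (i + 1) (by omega) (by omega) ?_
        intro j h1 h2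
        rcases Nat.lt_or_ge j i with hc | hc
        · exact hbelow j hc h2
        · have : j = i := by omega
          subst this; exact hlt
      · rw [pvAdvance, dif_pos h, if_neg hlt]
        exact ⟨by omega, hbelow, fun _ => hlt⟩
    · rw [pvAdvance, dif_neg h]
      exact ⟨hle, hbelow, fun hc => absurd hc h⟩

lemma pvAdvance_spec (p : List Int) (i : Nat) (g : Int) :
    i ≤ p.length → (∀ j (h1 : j < i) (h2 : j < p.length), p[j] < g) →
      pvAdvance p i g ≤ p.length ∧
      (∀ j (h1 : j < pvAdvance p i g) (h2 : j < p.length), p[j] < g) ∧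
      (∀ h : pvAdvance p i g < p.length, ¬ p[pvAdvance p i g] < g) :=
  pvAdvance_spec_aux p g (p.length - i) i (Nat.le_refl _)

-- with p strictly increasing, the cursor test decides membership
lemma cursor_mem_iff (p : List Int) (hp : p.Pairwise (· < ·)) (g : Int) (i' : Nat)
    (hle : i' ≤ p.length)
    (hbelow : ∀ j (h1 : j < i') (h2 : j < p.length), p[j] < g)
    (hstop : ∀ h : i' < p.length, ¬ p[i'] < g) :
    (i' = p.length ∨ p[i']? ≠ some g) ↔ g ∉ p := by
  constructor
  · rintro h hg
    rcases List.mem_iff_getElem.1 hg with ⟨j, hj, rfl⟩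
    have hji : ¬ j < i' := fun hc => lt_irrefl _ (hbelow j hc hj)
    rcases h with h | h
    · omega
    · have hi'lt : i' < p.length := by omega
      rcases Nat.lt_or_ge i' j with hij | hij
      · exact hstop hi'lt (List.pairwise_iff_getElem.1 hp i' j hi'lt hj hij)
      · have : i' = j := by omega
        subst this
        simp [List.getElem?_eq_getElem hi'lt] at h
  · intro hg
    by_cases h : i' = p.length
    · exact Or.inl h
    · have hi'lt : i' < p.length := by omega
      refine Or.inr ?_
      simp only [List.getElem?_eq_getElem hi'lt, ne_eq, Option.some.injEq]
      intro hc
      exact hg (hc ▸ List.getElem_mem hi'lt)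

-- the merge fold over the sorted ids equals A's membership-filter fold
lemma merge_fold_eq (p : List Int) (hp : p.Pairwise (· < ·)) (present : PySem.Set Int)
    (hmem : ∀ x : Int, PySem.Set.contains present x = true ↔ x ∈ p) :
    ∀ (l : List Int), l.Pairwise (· < ·) →
    ∀ (i : Nat) (errs : List String), i ≤ p.length →
    (∀ g ∈ l, ∀ j (h1 : j < i) (h2 : j < p.length), p[j] < g) →
    (l.foldl (fun (st : Nat × List String) grh_id =>
        let i := pvAdvance p st.1 grh_id
        if i = p.length ∨ p[i]? ≠ some grh_id
        then (i, st.2 ++ [pvMsg grh_id]) else (i, st.2)) (i, errs)).2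
    = l.foldl (fun errors grh_id =>
        if !(PySem.Set.contains present grh_id) then errors ++ [pvMsg grh_id] else errors) errs := by
  intro l
  induction l with
  | nil => intro _ i errs _ _; simp
  | cons g t ih =>
    intro hl i errs hi hbelow
    obtain ⟨hgt, ht⟩ := List.pairwise_cons.1 hl
    obtain ⟨hle', hbelow', hstop'⟩ :=
      pvAdvance_spec p i g hi (fun j h1 h2 => hbelow g List.mem_cons_self j h1 h2)
    have hmiff := cursor_mem_iff p hp g (pvAdvance p i g) hle' hbelow' hstop'
    have hnext : ∀ g' ∈ t, ∀ j (h1 : j < pvAdvance p i g) (h2 : j < p.length), p[j] < g' :=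
      fun g' hg' j h1 h2 => lt_trans (hbelow' j h1 h2) (hgt g' hg')
    simp only [List.foldl_cons]
    by_cases hc : g ∈ p
    · have hcb : present.contains g = true := (hmem g).2 hc
      rw [if_neg (by rw [hmiff]; simpa using hc)]
      rw [if_neg (by simp; exact (PySem.Set.contains_iff present g).1 hcb)]
      exact ih ht (pvAdvance p i g) errs hle' hnext
    · have hcb : present.contains g = false := by
        cases h' : present.contains g
        · rfl
        · exact absurd ((hmem g).1 h') hc
      rw [if_pos (hmiff.2 hc)]
      rw [if_pos (by simp only [Bool.not_eq_eq_eq_not, Bool.not_true, hcb])]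
      exact ih ht (pvAdvance p i g) (errs ++ [pvMsg g]) hle' hnext

-- ===== VERDICT (by name: the statement is the Claim_ definition above) =====
theorem verify_server_items_coverage_spec : Claim_equal_verify_server_items_coverage := by
  intro items_catalog server_grh_ids _ hpre
  unfold Spec_verify_server_items_coverage
  unfold verify_server_items_coverage verify_server_items_coverage_alt
  rcases Option.isSome_iff_exists.1 (mapM_isSome_of_pre items_catalog hpre) with ⟨vals, hvals⟩
  rw [hvals]
  simp only
  refine (merge_fold_eq _ (PySem.List.sorted_ofList_pairwise_lt vals) _ ?_ _
    (PySem.List.sorted_ofList_pairwise_lt server_grh_ids) 0 [] (Nat.zero_le _) ?_).symm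
  · intro x
    simp [PySem.List.mem_sorted, PySem.Set.mem_ofList]
  · intro g _ j hj; omega
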